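-- pv_equiv track=rewrite | github.com/DannyLee12/algos | k_palindrome.py | palindrone
-- ===== SOURCE A (Python) =====
-- from collections import defaultdict
--
-- def palindrone(s: str, k: int) -> int:
--     """Can one create a palidrome by removing at most k chars"""
--     d = defaultdict(int)
--
--     for x in s:
--         d[x] += 1
--
--     odds = 0
--
--     for v in d.values():
--         if v % 2 == 1:
--             odds += 1
--
--     return odds - 1 - k <= 0
-- ===== SOURCE B (Python) =====
-- def palindrone(s: str, k: int) -> int:
--     """Can one create a palidrome by removing at most k chars"""
--     def odds(t):
--         if not t:
--             return 0
--         c = t[0]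
--         rest = [x for x in t if x != c]
--         return (len(t) - len(rest)) % 2 + odds(rest)
--     return odds(list(s)) - 1 - k <= 0
-- ===== Notes on version B (the rewrite author's own statement) =====
-- stated objective: alternative
-- what changed: Replaces the frequency dict plus a second loop over its values with a recursive divide-and-conquer over character classes: repeatedly strip all occurrences of the first remaining character, add that class's length parity, and recurse on what is left.
import Mathlib
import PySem

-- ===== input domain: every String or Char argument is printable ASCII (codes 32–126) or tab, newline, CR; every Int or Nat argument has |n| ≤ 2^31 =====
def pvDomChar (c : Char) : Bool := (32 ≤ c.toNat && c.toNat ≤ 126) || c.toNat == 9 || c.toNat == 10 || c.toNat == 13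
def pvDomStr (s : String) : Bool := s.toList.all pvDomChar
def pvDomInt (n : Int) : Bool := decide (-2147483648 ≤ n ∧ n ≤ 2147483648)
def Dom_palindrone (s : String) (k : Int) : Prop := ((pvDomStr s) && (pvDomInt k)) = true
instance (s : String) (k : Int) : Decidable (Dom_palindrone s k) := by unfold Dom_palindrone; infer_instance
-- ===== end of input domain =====

-- B replaces the frequency dict + second values loop with a recursion over character
-- classes: strip all occurrences of the first character, add that class's parity, recurse
-- (alternative decomposition; same result, no dict and no second loop).

-- ===== PORT A =====
def palindrone (s : String) (k : Int) : Bool :=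
  let d : PySem.Dict Char Int :=
    s.toList.foldl (fun d x => d.modify x 0 (· + 1)) PySem.Dict.empty
  let odds : Int :=
    d.values.foldl (fun odds v => if PySem.Int.mod v 2 == 1 then odds + 1 else odds) 0
  decide (odds - 1 - k ≤ 0)

-- ===== PORT B =====
-- odds(t): parity of the first character's class + odds of the list with that class removed
def pvOddsRec (t : List Char) : Int :=
  match t with
  | [] => 0
  | c :: ts =>
    let rest := (c :: ts).filter (fun x => x != c)
    PySem.Int.mod (((c :: ts).length : Int) - (rest.length : Int)) 2 + pvOddsRec rest
termination_by t.length
decreasing_by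
  simp only [List.filter_cons, bne_self_eq_false, List.length_cons, cond_false]
  exact Nat.lt_succ_of_le (List.length_filter_le _ _)

def palindrone_alt (s : String) (k : Int) : Bool :=
  decide (pvOddsRec s.toList - 1 - k ≤ 0)

-- ===== PRECONDITION & SPEC =====
def Spec_palindrone (s : String) (k : Int) (out : Bool) : Prop := out = palindrone_alt s k
instance (s : String) (k : Int) (out : Bool) : Decidable (Spec_palindrone s k out) := by unfold Spec_palindrone; infer_instance

-- ===== CLAIM (what is proved, stated in full; the proofs are below) =====
def Claim_equal_palindrone : Prop := ∀ (s : String) (k : Int), Dom_palindrone s k → Spec_palindrone s k (palindrone s k)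

-- ===== LEMMAS AND PROOFS =====

lemma pvOddsRec_cons (c : Char) (ts : List Char) :
    pvOddsRec (c :: ts) =
      PySem.Int.mod (((c :: ts).length : Int) - ((ts.filter (fun x => x != c)).length : Int)) 2
        + pvOddsRec (ts.filter (fun x => x != c)) := by
  rw [pvOddsRec]
  simp [List.filter_cons]

lemma count_add_filter_ne (c : Char) (l : List Char) :
    l.count c + (l.filter (fun x => x != c)).length = l.length := by
  induction l with
  | nil => simp
  | cons a l ih =>
    by_cases h : a = c
    · subst h
      simp only [List.filter_cons, bne_self_eq_false, List.count_cons_self,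
        List.length_cons, if_false, Bool.false_eq_true]
      omega
    · have hb : (a != c) = true := bne_iff_ne.mpr h
      rw [List.filter_cons, if_pos hb]
      simp [List.count_cons, h]
      omega

-- B's recursion computes the number of characters with odd multiplicity
lemma pvOddsRec_eq : ∀ (n : ℕ) (t : List Char), t.length ≤ n →
    pvOddsRec t = ((PySem.Set.ofList t).countP (fun c => t.count c % 2 == 1) : Int) := by
  intro n
  induction n with
  | zero =>
    intro t ht
    have : t = [] := List.eq_nil_of_length_eq_zero (Nat.le_zero.mp ht)
    subst this; simp [pvOddsRec, PySem.Set.ofList]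
  | succ n ih =>
    intro t ht
    match t with
    | [] => simp [pvOddsRec, PySem.Set.ofList]
    | c :: ts =>
      rw [pvOddsRec_cons]
      have hlen : (ts.filter (fun x => x != c)).length ≤ ts.length :=
        List.length_filter_le _ _
      have hih := ih (ts.filter (fun x => x != c)) (le_trans hlen (Nat.le_of_succ_le_succ ht))
      -- count of c in c::ts = total length minus the filtered list's length
      have hcount : (c :: ts).count c + (ts.filter (fun x => x != c)).length = (c :: ts).length := by
        have := count_add_filter_ne c (c :: ts)
        simp only [List.filter_cons, bne_self_eq_false, cond_false] at this
        exact this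
      -- the Int.mod term is the parity of c's count
      have hmod : PySem.Int.mod (((c :: ts).length : Int) - ((ts.filter (fun x => x != c)).length : Int)) 2
          = (((c :: ts).count c % 2 : ℕ) : Int) := by
        have h1 : (((c :: ts).length : Int) - ((ts.filter (fun x => x != c)).length : Int))
            = (((c :: ts).count c : ℕ) : Int) := by omega
        rw [h1, show ((2 : Int) = ((2 : ℕ) : Int)) from rfl, PySem.Int.mod_natCast]
      -- the distinct characters of c :: ts, as a set, are c plus those of the filtered list
      have hperm : (PySem.Set.ofList (c :: ts)).Perm (c :: PySem.Set.ofList (ts.filter (fun x => x != c))) := by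
        apply (List.perm_ext_iff_of_nodup (PySem.Set.nodup_ofList _) ?_).mpr
        · intro x
          rw [PySem.Set.mem_ofList]
          simp only [List.mem_cons, PySem.Set.mem_ofList, List.mem_filter, bne_iff_ne]
          constructor
          · rintro (rfl | hx)
            · exact Or.inl rfl
            · by_cases hxc : x = c
              · exact Or.inl hxc
              · exact Or.inr ⟨hx, hxc⟩
          · rintro (rfl | ⟨hx, -⟩)
            · exact Or.inl rfl
            · exact Or.inr hx
        · refine List.Nodup.cons ?_ (PySem.Set.nodup_ofList _)
          intro hc
          have := (PySem.Set.mem_ofList _ _).mp hc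
          simp [List.mem_filter] at this
      -- counts agree between c::ts and the filtered list for every character in it
      have hcong : (PySem.Set.ofList (ts.filter (fun x => x != c))).countP
            (fun x => (ts.filter (fun x => x != c)).count x % 2 == 1)
          = (PySem.Set.ofList (ts.filter (fun x => x != c))).countP
            (fun x => (c :: ts).count x % 2 == 1) := by
        apply List.countP_congr
        intro a ha
        have hane : a ≠ c := by
          have := (PySem.Set.mem_ofList _ _).mp ha
          simp only [List.mem_filter, bne_iff_ne] at this
          exact this.2
        have hcc : (ts.filter (fun x => x != c)).count a = (c :: ts).count a := by
          rw [show ((c :: ts).count a = ts.count a) from by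
            simp [List.count_cons, Ne.symm hane]]
          exact List.count_filter (by simp [hane])
        rw [hcc]
      rw [hih, hcong, hmod, hperm.countP_eq, List.countP_cons]
      by_cases hp : (c :: ts).count c % 2 = 1
      · simp only [hp]
        norm_num
        omega
      · have h0 : (c :: ts).count c % 2 = 0 := by omega
        simp only [h0]
        norm_num

-- ===== VERDICT (by name: the statement is the Claim_ definition above) =====
theorem palindrone_spec : Claim_equal_palindrone := by
  intro s k _
  have hA :
      (PySem.Dict.values (s.toList.foldl (fun d x => d.modify x 0 (· + 1)) PySem.Dict.empty)).foldl
        (fun odds v => if PySem.Int.mod v 2 == 1 then odds + 1 else odds) 0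
      = pvOddsRec s.toList := by
    have hd : s.toList.foldl (fun d x => d.modify x 0 (· + 1)) PySem.Dict.empty
        = PySem.Dict.counter s.toList := (PySem.Dict.counter_eq_foldl s.toList).symm
    rw [hd, PySem.List.foldl_count_if]
    have hv : (PySem.Dict.counter s.toList).values
        = (PySem.Set.ofList s.toList).map (fun k => (s.toList.count k : Int)) := by
      show ((PySem.Dict.counter s.toList).items).map (·.2) = _
      rw [PySem.Dict.items_counter]
      simp [Function.comp]
    rw [hv, List.countP_map]
    have hp : ((fun v => PySem.Int.mod v 2 == 1) ∘ (fun k => (s.toList.count k : Int)))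
        = fun c => s.toList.count c % 2 == 1 := by
      funext c
      simp only [Function.comp]
      rw [show ((2 : Int) = ((2 : ℕ) : Int)) from rfl, PySem.Int.mod_natCast]
      rw [Bool.eq_iff_iff]
      simp only [beq_iff_eq]
      omega
    rw [hp, pvOddsRec_eq s.toList.length s.toList le_rfl]
    omega
  unfold Spec_palindrone palindrone palindrone_alt
  simp only [hA]
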